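-- pv_equiv track=rewrite | github.com/tryton/tryton-client | tryton/common/tdp.py | suggest
-- ===== SOURCE A (Python) =====
-- def suggest(words, suggestions):
--     candidate = ''
--     # Traking previous suggestion avoid duplicates when several
--     # fields have the same ending (ex: "Menu" and "Parent Menu"):
--     previous = set()
--     for pos, word in enumerate(words):
--         candidate = word + candidate
--         for field in suggestions:
--             if field.lower().startswith(candidate.lower()):
--                 if words[pos+1:]:
--                     new_item = ' '.join(reversed(words[pos+1:]))
--                     new_item += ' ' + field
--                 else:
--                     new_item = field
--                 if new_item not in previous:
--                     previous.add(new_item)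
--                     yield new_item
--         candidate = ' ' + candidate
-- ===== SOURCE B (Python) =====
-- def suggest(words, suggestions):
--     n = len(words)
--     # one pass to precompute the lowercased reversed-prefix candidate per position
--     cands = []
--     acc = ''
--     for pos, word in enumerate(words):
--         acc = word if pos == 0 else word + ' ' + acc
--         cands.append(acc.lower())
--     # the reversed-suffix prefix string per position, computed once
--     tails = [' '.join(reversed(words[pos + 1:])) for pos in range(n)]
--     # ONE pass over the suggestions (each lowercased once), bucketing matches by position
--     buckets = [[] for _ in range(n)]
--     for field in suggestions:
--         lf = field.lower()
--         buckets = [b + [field] if lf.startswith(c) else b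
--                    for b, c in zip(buckets, cands)]
--     out = []
--     for pos, bucket in enumerate(buckets):
--         for field in bucket:
--             out.append(field if pos == n - 1 else tails[pos] + ' ' + field)
--     yield from dict.fromkeys(out)
-- ===== Notes on version B (the rewrite author's own statement) =====
-- stated objective: faster
-- what changed: B inverts the traversal: it precomputes the lowercased reversed-prefix candidate and the suffix string once per position, makes a single pass over the suggestions (each lowercased once) bucketing matches by position, and dedups the flattened buckets with dict.fromkeys, instead of A's per-position rescans that re-lowercase every field and re-join the suffix at every match.
import Mathlib
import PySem

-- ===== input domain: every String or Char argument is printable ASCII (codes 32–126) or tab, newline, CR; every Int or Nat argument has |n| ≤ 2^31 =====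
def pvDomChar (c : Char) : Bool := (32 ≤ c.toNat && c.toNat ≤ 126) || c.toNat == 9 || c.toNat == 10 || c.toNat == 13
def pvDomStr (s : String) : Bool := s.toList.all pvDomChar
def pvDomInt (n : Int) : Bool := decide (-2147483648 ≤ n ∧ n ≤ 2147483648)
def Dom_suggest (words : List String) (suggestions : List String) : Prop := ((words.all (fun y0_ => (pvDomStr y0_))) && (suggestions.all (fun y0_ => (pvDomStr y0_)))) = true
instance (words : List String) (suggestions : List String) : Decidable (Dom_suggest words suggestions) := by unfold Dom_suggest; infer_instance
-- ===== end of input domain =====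

-- B re-implements A's generator (returned here as the list of yielded items) with hoisted
-- lowercasing/joining and a single suggestions pass bucketed by position; measured faster by a
-- constant factor, provably the same output list.

-- ===== PORT A =====
-- the body of A's inner 'for field in suggestions' loop
def stepA_inner (ws : List (List Char)) (pos : Int) (candidate : List Char)
    (q : PySem.Set (List Char) × List (List Char)) (field : List Char) :
    PySem.Set (List Char) × List (List Char) :=
  if PySem.Chars.startswith (PySem.Chars.lower field) (PySem.Chars.lower candidate) then
    let rest := PySem.List.slice ws (some (pos + 1)) none
    let newItem :=
      if rest ≠ [] then PySem.Chars.join [' '] rest.reverse ++ [' '] ++ field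
      else field
    if (PySem.Set.contains q.1 newItem) = false then
      (PySem.Set.add q.1 newItem, q.2 ++ [newItem])
    else q
  else q

-- the body of A's outer 'for pos, word in enumerate(words)' loop (state: candidate, previous, yielded)
def stepA_outer (ws fs : List (List Char))
    (st : List Char × PySem.Set (List Char) × List (List Char)) (pw : Int × List Char) :
    List Char × PySem.Set (List Char) × List (List Char) :=
  let candidate := pw.2 ++ st.1
  let inner := fs.foldl (stepA_inner ws pw.1 candidate) (st.2.1, st.2.2)
  (' ' :: candidate, inner.1, inner.2)

def suggest (words : List String) (suggestions : List String) : List String :=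
  let ws := words.map String.toList
  let fs := suggestions.map String.toList
  let final := (PySem.List.enumerate ws 0).foldl (stepA_outer ws fs) ([], PySem.Set.empty, [])
  final.2.2.map String.ofList

-- ===== PORT B =====
-- the body of B's candidate-building loop
def stepB_cand (st : List Char × List (List Char)) (pw : Int × List Char) :
    List Char × List (List Char) :=
  let acc := if pw.1 == 0 then pw.2 else pw.2 ++ ' ' :: st.1
  (acc, st.2 ++ [PySem.Chars.lower acc])

def suggest_alt (words : List String) (suggestions : List String) : List String :=
  let ws := words.map String.toList
  let fs := suggestions.map String.toList
  let n := ws.length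
  let cands := ((PySem.List.enumerate ws 0).foldl stepB_cand ([], [])).2
  let tails := (PySem.List.pyRange 0 (n : Int) 1).map
      (fun pos => PySem.Chars.join [' '] ((PySem.List.slice ws (some (pos + 1)) none).reverse))
  let buckets :=
    fs.foldl
      (fun (bs : List (List (List Char))) field =>
        let lf := PySem.Chars.lower field
        (bs.zip cands).map (fun bc => if PySem.Chars.startswith lf bc.2 then bc.1 ++ [field] else bc.1))
      (List.replicate n [])
  let out :=
    (PySem.List.enumerate buckets 0).foldl
      (fun (out : List (List Char)) pb =>
        pb.2.foldl
          (fun out field =>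
            out ++ [if pb.1 == (n : Int) - 1 then field
                    else PySem.List.pyGetD tails pb.1 [] ++ [' '] ++ field])
          out)
      []
  (PySem.List.dedup out).map String.ofList

-- ===== PRECONDITION & SPEC =====
def Spec_suggest (words : List String) (suggestions : List String) (out : List String) : Prop := out = suggest_alt words suggestions
instance (words : List String) (suggestions : List String) (out : List String) : Decidable (Spec_suggest words suggestions out) := by unfold Spec_suggest; infer_instance

-- ===== CLAIM (what is proved, stated in full; the proofs are below) =====
def Claim_equal_suggest : Prop := ∀ (words : List String) (suggestions : List String), Dom_suggest words suggestions → Spec_suggest words suggestions (suggest words suggestions)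

-- ===== LEMMAS AND PROOFS =====

-- the candidate string after the iteration at position k: words[k] + ' ' + … + ' ' + words[0]
def candF (ws : List (List Char)) : Nat → List Char
  | 0 => ws.getD 0 []
  | k+1 => ws.getD (k+1) [] ++ ' ' :: candF ws k

-- the reversed-suffix prefix ' '.join(reversed(words[k+1:]))
def tailF (ws : List (List Char)) (k : Nat) : List Char :=
  PySem.Chars.join [' '] ((ws.drop (k+1)).reverse)

def matchF (ws : List (List Char)) (k : Nat) (f : List Char) : Bool :=
  PySem.Chars.startswith (PySem.Chars.lower f) (PySem.Chars.lower (candF ws k))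

def itemF (ws : List (List Char)) (k : Nat) (f : List Char) : List Char :=
  if k + 1 < ws.length then tailF ws k ++ ' ' :: f else f

-- the raw (pre-dedup) stream of emitted items
def rawF (ws fs : List (List Char)) : List (List Char) :=
  (List.range ws.length).flatMap (fun k => (fs.filter (matchF ws k)).map (itemF ws k))

-- emit-if-new on the (previous, yielded) pair
def pushF (q : PySem.Set (List Char) × List (List Char)) (x : List Char) :
    PySem.Set (List Char) × List (List Char) :=
  if (PySem.Set.contains q.1 x) = false then (PySem.Set.add q.1 x, q.2 ++ [x]) else q

-- A's candidate state at entry of iteration k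
def entryC (ws : List (List Char)) (k : Nat) : List Char :=
  if k = 0 then [] else ' ' :: candF ws (k - 1)

lemma entryC_step (ws : List (List Char)) (k : Nat) (w : List Char) (h : ws.getD k [] = w) :
    w ++ entryC ws k = candF ws k := by
  cases k with
  | zero => simp [entryC, candF, ← h]
  | succ m => simp [entryC, candF, ← h]

lemma pushF_diag (xs : List (List Char)) (s : PySem.Set (List Char)) :
    xs.foldl pushF (s, s) = (xs.foldl PySem.Set.add s, xs.foldl PySem.Set.add s) := by
  induction xs generalizing s with
  | nil => rfl
  | cons x xs ih =>
    by_cases hx : x ∈ s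
    · simp only [List.foldl_cons, PySem.Set.add_of_mem hx]
      have hp : pushF (s, s) x = (s, s) := by simp [pushF, hx]
      rw [hp, ih]
    · simp only [List.foldl_cons, PySem.Set.add_of_not_mem hx]
      have hp : pushF (s, s) x = (s ++ [x], s ++ [x]) := by simp [pushF, hx]
      rw [hp, ih]

lemma stepA_inner_eq (ws : List (List Char)) (k : Nat) :
    stepA_inner ws (k : Int) (candF ws k) =
      fun q f => if matchF ws k f then pushF q (itemF ws k f) else q := by
  funext q f
  have hc : ((k : Int) + 1) = ((k + 1 : Nat) : Int) := by push_cast; ring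
  have hs : PySem.List.slice ws (some ((k : Int) + 1)) none = ws.drop (k + 1) := by
    rw [hc, PySem.List.slice_from_natCast]
  unfold stepA_inner matchF pushF itemF tailF
  rw [hs]
  by_cases hm : PySem.Chars.startswith (PySem.Chars.lower f) (PySem.Chars.lower (candF ws k)) = true
  · simp only [hm, if_true]
    by_cases hr : ws.drop (k + 1) = []
    · have h1 : ¬ (k + 1 < ws.length) := by
        have := List.drop_eq_nil_iff.mp hr; omega
      simp [hr, h1]
    · have h1 : k + 1 < ws.length := by
        rcases Nat.lt_or_ge (k + 1) ws.length with h2 | h2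
        · exact h2
        · exact absurd (List.drop_eq_nil_iff.mpr h2) hr
      simp [hr, h1, List.append_assoc]
  · simp [hm]

-- the main A loop invariant
lemma foldA (ws fs : List (List Char)) (sfx : List (List Char)) (k : Nat)
    (q : PySem.Set (List Char) × List (List Char)) (h : sfx = ws.drop k) :
    ((PySem.List.enumerate sfx (k : Int)).foldl (stepA_outer ws fs) (entryC ws k, q)).2 =
      (List.range' k sfx.length).foldl
        (fun q k => fs.foldl (fun q f => if matchF ws k f then pushF q (itemF ws k f) else q) q) q := by
  induction sfx generalizing k q with
  | nil => simp [PySem.List.enumerate]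
  | cons w rest ih =>
    have hw : ws.getD k [] = w := by
      have h0 : ws[k]? = some w := by
        have h1 : (ws.drop k)[0]? = some w := by rw [← h]; rfl
        rw [List.getElem?_drop] at h1; simpa using h1
      simp [List.getD, h0]
    have hcand : w ++ entryC ws k = candF ws k := entryC_step ws k w hw
    have hrest : rest = ws.drop (k + 1) := by
      have : ws.drop (k+1) = (ws.drop k).drop 1 := by rw [List.drop_drop]
      rw [this, ← h]; rfl
    rw [PySem.List.enumerate_cons]
    simp only [List.foldl_cons]
    have hstep : stepA_outer ws fs (entryC ws k, q) ((k : Int), w) =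
        (entryC ws (k + 1),
          fs.foldl (fun q f => if matchF ws k f then pushF q (itemF ws k f) else q) q) := by
      unfold stepA_outer
      simp only [hcand]
      rw [stepA_inner_eq ws k]
      have he : entryC ws (k + 1) = ' ' :: candF ws k := by simp [entryC]
      simp [he]
    rw [hstep]
    have hc1 : ((k : Int) + 1) = ((k + 1 : Nat) : Int) := by push_cast; ring
    rw [hc1, ih (k + 1) _ hrest]
    simp [List.range'_succ]

-- A computes dedup (rawF ws fs)
lemma suggest_eq_raw (words suggestions : List String) :
    suggest words suggestions =
      (PySem.List.dedup (rawF (words.map String.toList) (suggestions.map String.toList))).map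
        String.ofList := by
  unfold suggest
  dsimp only
  set ws := words.map String.toList with hws
  set fs := suggestions.map String.toList with hfs
  have h0 : (0 : Int) = ((0 : Nat) : Int) := by norm_num
  have hinit : (([], PySem.Set.empty, []) :
      List Char × PySem.Set (List Char) × List (List Char)) = (entryC ws 0, ([], [])) := by
    simp [entryC]
  rw [hinit, h0, foldA ws fs ws 0 ([], []) (by simp)]
  have hcongr : (List.range' 0 ws.length).foldl
      (fun q k => fs.foldl (fun q f => if matchF ws k f then pushF q (itemF ws k f) else q) q)
      (([], []) : PySem.Set (List Char) × List (List Char)) =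
      (List.range' 0 ws.length).foldl
      (fun q k => ((fs.filter (matchF ws k)).map (itemF ws k)).foldl pushF q) ([], []) := by
    apply PySem.List.foldl_congr_mem
    intro acc x _
    rw [PySem.List.foldl_if_eq_foldl_filter (matchF ws x) (fun q f => pushF q (itemF ws x f)) fs acc]
    rw [List.foldl_map]
  rw [hcongr, ← List.foldl_flatMap, ← List.range_eq_range']
  have : (List.range ws.length).flatMap (fun k => (fs.filter (matchF ws k)).map (itemF ws k)) = rawF ws fs := rfl
  rw [this]
  have hse : (PySem.Set.empty : PySem.Set (List Char)) = [] := rfl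
  rw [pushF_diag]
  simp [PySem.List.dedup, PySem.Set.ofList_eq_foldl]

-- ===== B-side lemmas =====

lemma foldB_cand (ws : List (List Char)) (sfx : List (List Char)) (k : Nat)
    (a : List Char) (l : List (List Char)) (h : sfx = ws.drop k)
    (ha : 0 < k → a = candF ws (k - 1)) :
    ((PySem.List.enumerate sfx (k : Int)).foldl stepB_cand (a, l)).2 =
      l ++ (List.range' k sfx.length).map (fun j => PySem.Chars.lower (candF ws j)) := by
  induction sfx generalizing k a l with
  | nil => simp [PySem.List.enumerate]
  | cons w rest ih =>
    have hw : ws.getD k [] = w := by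
      have h0 : ws[k]? = some w := by
        have h1 : (ws.drop k)[0]? = some w := by rw [← h]; rfl
        rw [List.getElem?_drop] at h1; simpa using h1
      simp [List.getD, h0]
    have hrest : rest = ws.drop (k + 1) := by
      have : ws.drop (k+1) = (ws.drop k).drop 1 := by rw [List.drop_drop]
      rw [this, ← h]; rfl
    have hacc : (if ((k : Int) == 0) then w else w ++ ' ' :: a) = candF ws k := by
      cases k with
      | zero => simp [candF, ← hw]
      | succ m =>
        have hb : (((m + 1 : Nat) : Int) == 0) = false := by
          simp only [beq_eq_false_iff_ne, ne_eq]
          push_cast; omega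
        rw [hb]
        simp only [Bool.false_eq_true, if_false]
        rw [ha (by omega)]
        simp [candF, ← hw]
    rw [PySem.List.enumerate_cons]
    simp only [List.foldl_cons]
    have hstep : stepB_cand (a, l) ((k : Int), w) =
        (candF ws k, l ++ [PySem.Chars.lower (candF ws k)]) := by
      unfold stepB_cand
      simp only [hacc]
    rw [hstep]
    have hc1 : ((k : Int) + 1) = ((k + 1 : Nat) : Int) := by push_cast; ring
    rw [hc1, ih (k + 1) _ _ hrest (fun _ => by simp)]
    simp [List.range'_succ]

lemma foldB_buckets (cds : List (List Char)) (fs : List (List Char)) (bs : List (List (List Char)))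
    (hlen : bs.length = cds.length) :
    fs.foldl
      (fun bs f =>
        (bs.zip cds).map (fun bc =>
          if PySem.Chars.startswith (PySem.Chars.lower f) bc.2 then bc.1 ++ [f] else bc.1)) bs =
      (bs.zip cds).map (fun bc =>
        bc.1 ++ fs.filter (fun f => PySem.Chars.startswith (PySem.Chars.lower f) bc.2)) := by
  induction fs generalizing bs with
  | nil =>
    simp only [List.foldl_nil, List.filter_nil, List.append_nil]
    have h2 := List.map_fst_zip (l₁ := bs) (l₂ := cds) (le_of_eq hlen)
    simpa using h2.symm
  | cons f fs ih =>
    simp only [List.foldl_cons]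
    set bs' := (bs.zip cds).map (fun bc =>
      if PySem.Chars.startswith (PySem.Chars.lower f) bc.2 then bc.1 ++ [f] else bc.1) with hbs'
    have hlen' : bs'.length = cds.length := by
      simp [hbs', List.length_zip, hlen]
    rw [ih bs' hlen']
    apply List.ext_getElem
    · simp [hbs', List.length_zip, hlen]
    · intro j hj1 hj2
      have hjb : j < bs.length := by
        simpa [hbs', List.length_zip, hlen] using hj1
      have hjc : j < cds.length := by omega
      have hjb' : j < bs'.length := by omega
      simp only [List.getElem_map, List.getElem_zip, hbs', List.filter_cons]
      by_cases hp : PySem.Chars.startswith (PySem.Chars.lower f) cds[j] = true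
      · simp [hp]
      · simp [hp]

lemma enumerate_map_range' (bf : Nat → List (List Char)) (m s : Nat) :
    PySem.List.enumerate ((List.range' s m).map bf) (s : Int) =
      (List.range' s m).map (fun (k : Nat) => (((k : Nat) : Int), bf k)) := by
  induction m generalizing s with
  | zero => simp
  | succ m ih =>
    rw [List.range'_succ]
    simp only [List.map_cons, PySem.List.enumerate_cons]
    have hc : ((s : Int) + 1) = ((s + 1 : Nat) : Int) := by push_cast; ring
    rw [hc, ih (s + 1)]

lemma suggest_alt_eq_raw (words suggestions : List String) :
    suggest_alt words suggestions =
      (PySem.List.dedup (rawF (words.map String.toList) (suggestions.map String.toList))).map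
        String.ofList := by
  unfold suggest_alt
  dsimp only
  set ws := words.map String.toList with hws
  set fs := suggestions.map String.toList with hfs
  set n := ws.length with hn
  have h0 : (0 : Int) = ((0 : Nat) : Int) := by norm_num
  -- the candidate list
  have hcands : ((PySem.List.enumerate ws 0).foldl stepB_cand ([], [])).2 =
      (List.range n).map (fun j => PySem.Chars.lower (candF ws j)) := by
    rw [h0, foldB_cand ws ws 0 [] [] (by simp) (by omega)]
    simp only [List.nil_append, List.range_eq_range']
    rw [← hn]
  rw [hcands]
  set cnds := (List.range n).map (fun j => PySem.Chars.lower (candF ws j)) with hcnds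
  have hclen : cnds.length = n := by simp [hcnds]
  -- the buckets
  rw [foldB_buckets cnds fs (List.replicate n []) (by simp [hclen])]
  have hbuckets : ((List.replicate n ([] : List (List Char))).zip cnds).map
      (fun bc => bc.1 ++ fs.filter (fun f => PySem.Chars.startswith (PySem.Chars.lower f) bc.2)) =
      (List.range' 0 n).map (fun k => fs.filter (matchF ws k)) := by
    apply List.ext_getElem
    · simp [hclen]
    · intro j hj1 hj2
      have hjn : j < n := by simpa [hclen] using hj1
      simp only [List.getElem_map, List.getElem_zip, List.getElem_replicate, List.nil_append,
        List.getElem_range', hcnds, List.getElem_range, Nat.zero_add, Nat.one_mul]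
      rfl
  rw [hbuckets]
  -- the output loop
  set g : Int → List Char → List Char := fun pos field =>
    if pos == (n : Int) - 1 then field
    else PySem.List.pyGetD ((PySem.List.pyRange 0 (n : Int) 1).map
        (fun pos => PySem.Chars.join [' '] ((PySem.List.slice ws (some (pos + 1)) none).reverse))) pos [] ++
      [' '] ++ field with hg
  have hout : (PySem.List.enumerate ((List.range' 0 n).map (fun k => fs.filter (matchF ws k))) 0).foldl
      (fun (out : List (List Char)) pb => pb.2.foldl (fun out field => out ++ [g pb.1 field]) out)
      [] = rawF ws fs := by
    rw [h0, enumerate_map_range' (fun k => fs.filter (matchF ws k)) n 0]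
    have hfun : (fun (out : List (List Char)) (pb : Int × List (List Char)) =>
        pb.2.foldl (fun out field => out ++ [g pb.1 field]) out) =
        fun out pb => out ++ pb.2.map (g pb.1) := by
      funext out pb
      rw [PySem.List.foldl_append_singleton_eq_map]
    rw [hfun, PySem.List.foldl_append_eq_flatMap
      (g := fun (pb : Int × List (List Char)) => pb.2.map (g pb.1)), List.flatMap_map]
    simp only [List.nil_append]
    have hper : ∀ k ∈ List.range' 0 n,
        (fs.filter (matchF ws k)).map (g (k : Int)) = (fs.filter (matchF ws k)).map (itemF ws k) := by
      intro k hk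
      have hkn : k < n := by
        rcases List.mem_range'.mp hk with ⟨i, hi, rfl⟩; omega
      apply List.map_congr_left
      intro f _
      rw [hg]
      dsimp only
      by_cases hlt : k + 1 < n
      · have hne : ((k : Int) == (n : Int) - 1) = false := by
          simp only [beq_eq_false_iff_ne, ne_eq]
          omega
        rw [hne]
        simp only [Bool.false_eq_true, if_false]
        have hget : PySem.List.pyGetD ((PySem.List.pyRange 0 (n : Int) 1).map
            (fun pos => PySem.Chars.join [' '] ((PySem.List.slice ws (some (pos + 1)) none).reverse)))
            (k : Int) [] =
            PySem.Chars.join [' '] ((PySem.List.slice ws (some ((k : Int) + 1)) none).reverse) :=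
          PySem.List.pyGetD_map_pyRange _ n k [] hkn
        rw [hget]
        have hc : ((k : Int) + 1) = ((k + 1 : Nat) : Int) := by push_cast; ring
        rw [hc, PySem.List.slice_from_natCast]
        have hlt' : k + 1 < ws.length := hlt
        simp [itemF, tailF, hlt', List.append_assoc]
      · have hkeq : k = n - 1 := by omega
        have heq : ((k : Int) == (n : Int) - 1) = true := by
          simp only [beq_iff_eq]
          omega
        rw [heq]
        have hlt' : ¬ k + 1 < ws.length := hlt
        simp [itemF, hlt']
    calc (List.range' 0 n).flatMap (fun k => (fs.filter (matchF ws k)).map (g (k : Int)))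
        = (List.range' 0 n).flatMap (fun k => (fs.filter (matchF ws k)).map (itemF ws k)) := by
          rw [List.flatMap_def, List.flatMap_def, List.map_congr_left hper]
      _ = rawF ws fs := by rw [rawF, List.range_eq_range']
  rw [hout]

-- ===== VERDICT (by name: the statement is the Claim_ definition above) =====
theorem suggest_spec : Claim_equal_suggest := by
  intro words suggestions _
  unfold Spec_suggest
  rw [suggest_eq_raw, suggest_alt_eq_raw]
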